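-- pv_equiv track=rewrite | github.com/sablet/ConvoTree | data_api/scripts/utils/message_deduplication.py | deduplicate_by_prefix
-- ===== SOURCE A (Python) =====
-- from typing import Dict, List, Optional, Set
--
-- def deduplicate_by_prefix(rows: List[Dict[str, str]], prefix_length: int = 30) -> List[Dict[str, str]]:
--     """
--     先頭テキストが同じメッセージを検出し、最新のもの以外を除去
--
--     Args:
--         rows: CSV行データのリスト
--         prefix_length: 比較する先頭文字数
--
--     Returns:
--         重複除去後の行データリスト
--     """
--     from collections import defaultdict
--
--     # 先頭テキストでグループ化（[Q]を除いた実際のテキスト部分で比較）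
--     prefix_groups = defaultdict(list)
--
--     for row in rows:
--         content = row["combined_content"]
--         # [Q] の後の実際のテキスト部分を取得
--         if content.startswith("[Q] "):
--             text_part = content[4:]  # "[Q] " を除去
--         else:
--             text_part = content
--
--         # 先頭N文字を取得（改行エスケープを考慮）
--         prefix = text_part[:prefix_length]
--         prefix_groups[prefix].append(row)
--
--     # 各グループで最新のもの以外を除去
--     deduplicated = []
--
--     for prefix, group in prefix_groups.items():
--         if len(group) == 1:
--             deduplicated.append(group[0])
--         else:
--             # タイムスタンプでソート（最新が最後）
--             sorted_group = sorted(group, key=lambda x: x["start_time"])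
--             # 最新のもののみを保持
--             deduplicated.append(sorted_group[-1])
--
--     # タイムスタンプでソート
--     deduplicated.sort(key=lambda x: x["start_time"])
--
--     return deduplicated
-- ===== SOURCE B (Python) =====
-- def deduplicate_by_prefix(rows, prefix_length=30):
--     """Single pass: dict prefix -> best row so far (>= keeps last among ties), then one final sort."""
--     best = {}
--     for row in rows:
--         content = row["combined_content"]
--         text_part = content[4:] if content.startswith("[Q] ") else content
--         key = text_part[:prefix_length]
--         cur = best.get(key)
--         if cur is None or row["start_time"] >= cur["start_time"]:
--             best[key] = row
--     return sorted(best.values(), key=lambda x: x["start_time"])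
-- ===== Notes on version B (the rewrite author's own statement) =====
-- stated objective: simpler
-- what changed: Replaces group-into-lists-then-sort-each-group with a single pass keeping one best row per prefix in a dict (replace on start_time >=, so the last among ties wins), followed by one final sort of the survivors.
import Mathlib
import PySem

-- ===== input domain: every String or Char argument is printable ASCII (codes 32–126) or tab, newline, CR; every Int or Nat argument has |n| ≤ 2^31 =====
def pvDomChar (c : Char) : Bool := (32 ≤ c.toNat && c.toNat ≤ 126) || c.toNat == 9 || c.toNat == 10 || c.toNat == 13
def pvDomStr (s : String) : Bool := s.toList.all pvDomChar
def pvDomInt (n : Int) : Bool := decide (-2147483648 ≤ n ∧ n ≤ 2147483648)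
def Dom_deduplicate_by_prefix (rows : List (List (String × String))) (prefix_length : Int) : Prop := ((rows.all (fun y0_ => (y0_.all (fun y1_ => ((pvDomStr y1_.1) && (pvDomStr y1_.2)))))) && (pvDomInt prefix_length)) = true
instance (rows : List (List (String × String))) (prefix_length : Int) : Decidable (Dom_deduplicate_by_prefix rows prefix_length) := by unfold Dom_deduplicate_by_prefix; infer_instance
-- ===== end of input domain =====

-- B replaces A's build-all-groups-then-sort-each-group dedup by a single pass keeping the best
-- row per prefix in a dict (replace on start_time >=, last among ties wins), then one final sort.


-- ===== PORT A =====
-- row[k]: first-match association-list lookup; exact under Pre_ (the key is present in every row)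
def pvGet (row : List (String × String)) (k : String) : String :=
  (PySem.Dict.mk row).getD k ""

-- the prefix a row is grouped by: strip a leading "[Q] ", take the first prefix_length characters
def pvPrefix (row : List (String × String)) (prefix_length : Int) : String :=
  let content := pvGet row "combined_content"
  let text_part := if PySem.Str.startswith content "[Q] " then PySem.Str.slice content (some 4) none else content
  PySem.Str.slice text_part none (some prefix_length)

def deduplicate_by_prefix (rows : List (List (String × String))) (prefix_length : Int) : List (List (String × String)) :=
  -- prefix_groups = defaultdict(list), appended to in row order
  let prefix_groups : PySem.Dict String (List (List (String × String))) :=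
    rows.foldl (fun d row => d.modify (pvPrefix row prefix_length) [] (fun g => g ++ [row])) PySem.Dict.empty
  -- per group: keep group[0] if singleton, else sorted(group, key=start_time)[-1]
  let deduplicated : List (List (String × String)) :=
    prefix_groups.items.foldl (fun acc pg =>
      if pg.2.length == 1 then acc ++ [PySem.List.pyGetD pg.2 0 []]
      else acc ++ [PySem.List.pyGetD (PySem.List.sorted pg.2 (fun x => pvGet x "start_time") false) (-1) []]) []
  PySem.List.sorted deduplicated (fun x => pvGet x "start_time") false

-- ===== PORT B =====
def deduplicate_by_prefix_alt (rows : List (List (String × String))) (prefix_length : Int) : List (List (String × String)) :=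
  let best : PySem.Dict String (List (String × String)) :=
    rows.foldl (fun d row =>
      let key := pvPrefix row prefix_length
      match d.get? key with
      | none => d.insert key row
      | some cur => if pvGet cur "start_time" ≤ pvGet row "start_time" then d.insert key row else d)
      PySem.Dict.empty
  PySem.List.sorted best.values (fun x => pvGet x "start_time") false

-- ===== PRECONDITION & SPEC =====
-- Pre_ excludes exactly the inputs on which the Python raises KeyError: every row must carry
-- both a "combined_content" and a "start_time" key.
def Pre_deduplicate_by_prefix (rows : List (List (String × String))) (prefix_length : Int) : Prop :=
  ∀ row ∈ rows, "combined_content" ∈ row.map (·.1) ∧ "start_time" ∈ row.map (·.1)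
instance (rows : List (List (String × String))) (prefix_length : Int) : Decidable (Pre_deduplicate_by_prefix rows prefix_length) := by unfold Pre_deduplicate_by_prefix; infer_instance

def pvWitness_deduplicate_by_prefix : (List (List (String × String))) × Int :=
  ([[("combined_content", "[Q] hello"), ("start_time", "2")],
    [("combined_content", "hello there"), ("start_time", "1")]], 5)

def Spec_deduplicate_by_prefix (rows : List (List (String × String))) (prefix_length : Int) (out : List (List (String × String))) : Prop := out = deduplicate_by_prefix_alt rows prefix_length
instance (rows : List (List (String × String))) (prefix_length : Int) (out : List (List (String × String))) : Decidable (Spec_deduplicate_by_prefix rows prefix_length out) := by unfold Spec_deduplicate_by_prefix; infer_instance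

-- ===== CLAIM (what is proved, stated in full; the proofs are below) =====
def Claim_equal_deduplicate_by_prefix : Prop := ∀ (rows : List (List (String × String))) (prefix_length : Int), Dom_deduplicate_by_prefix rows prefix_length → Pre_deduplicate_by_prefix rows prefix_length → Spec_deduplicate_by_prefix rows prefix_length (deduplicate_by_prefix rows prefix_length)

-- ===== LEMMAS AND PROOFS =====

def pvSt (x : List (String × String)) : String := pvGet x "start_time"
def pvWStep (b r : List (String × String)) : List (String × String) :=
  if pvSt b ≤ pvSt r then r else b
def pvWinner (g : List (List (String × String))) : List (String × String) :=
  match g with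
  | [] => []
  | h :: t => t.foldl pvWStep h
def pvWFold (o : Option (List (String × String))) (r : List (String × String)) : Option (List (String × String)) :=
  some (match o with | none => r | some b => pvWStep b r)

theorem pvInsertBy_ne_nil (x : List (String × String)) (ys : List (List (String × String))) :
    PySem.List.insertBy (fun a b => decide (pvSt a < pvSt b)) x ys ≠ [] := by
  cases ys with
  | nil => simp [PySem.List.insertBy]
  | cons y ys => simp only [PySem.List.insertBy]; split <;> simp

theorem pvLast_insertBy (x : List (String × String)) (ys : List (List (String × String)))
    (hs : ys.Pairwise (fun a b => pvSt a ≤ pvSt b)) :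
    (PySem.List.insertBy (fun a b => decide (pvSt a < pvSt b)) x ys).getLast? =
      some (match ys.getLast? with | none => x | some l => pvWStep l x) := by
  induction ys with
  | nil => simp [PySem.List.insertBy]
  | cons y ys ih =>
    simp only [PySem.List.insertBy]
    by_cases hlt : pvSt x < pvSt y
    · simp only [hlt, decide_true, if_true]
      rcases hL : (y :: ys).getLast? with _ | L
      · simp at hL
      · have hmem : L ∈ y :: ys := List.mem_of_getLast? hL
        have hyL : pvSt y ≤ pvSt L := by
          rcases List.mem_cons.mp hmem with h | h
          · rw [h]
          · exact (List.pairwise_cons.mp hs).1 _ h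
        have hnot : ¬ pvSt L ≤ pvSt x := fun hc =>
          absurd (lt_of_lt_of_le hlt (le_trans hyL hc)) (lt_irrefl _)
        rw [List.getLast?_cons_cons, hL]
        simp [pvWStep, hnot]
    · simp only [hlt, decide_false, Bool.false_eq_true, if_false]
      rcases hz : PySem.List.insertBy (fun a b => decide (pvSt a < pvSt b)) x ys with _ | ⟨z, zs⟩
      · exact absurd hz (pvInsertBy_ne_nil x ys)
      · rw [List.getLast?_cons_cons, ← hz, ih (List.pairwise_cons.mp hs).2]
        cases ys with
        | nil =>
          have hyx : pvSt y ≤ pvSt x := le_of_not_gt hlt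
          simp [pvWStep, hyx]
        | cons w ws => rw [List.getLast?_cons_cons]

theorem pvWFold_some (t : List (List (String × String))) (h : List (String × String)) :
    t.foldl pvWFold (some h) = some (t.foldl pvWStep h) := by
  induction t generalizing h with
  | nil => rfl
  | cons r t ih => simp only [List.foldl_cons]; exact ih _

theorem pvLast_sorted (g : List (List (String × String))) :
    (PySem.List.sorted g pvSt false).getLast? = g.foldl pvWFold none := by
  induction g using List.reverseRecOn with
  | nil => simp [PySem.List.sorted]
  | append_singleton g x ih =>
    rw [PySem.List.sorted_eq_foldl_insertBy, List.foldl_append, List.foldl_cons, List.foldl_nil,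
      ← PySem.List.sorted_eq_foldl_insertBy]
    rw [pvLast_insertBy x _ (PySem.List.sorted_pairwise g pvSt), ih, List.foldl_append,
      List.foldl_cons, List.foldl_nil]
    rcases hL : g.foldl pvWFold none with _ | L <;> simp [pvWFold]

theorem pvWinner_last (g : List (List (String × String))) (hg : g ≠ []) :
    (PySem.List.sorted g pvSt false).getLast? = some (pvWinner g) := by
  cases g with
  | nil => exact absurd rfl hg
  | cons h t =>
    rw [pvLast_sorted, List.foldl_cons]
    exact pvWFold_some t h

def pvWMap (p : String × List (List (String × String))) : String × List (String × String) :=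
  (p.1, pvWinner p.2)

theorem pvWinner_append (g : List (List (String × String))) (r : List (String × String)) (hg : g ≠ []) :
    pvWinner (g ++ [r]) = pvWStep (pvWinner g) r := by
  cases g with
  | nil => exact absurd rfl hg
  | cons h t => simp [pvWinner, List.foldl_append]

def pvRel (d1 : PySem.Dict String (List (List (String × String))))
    (d2 : PySem.Dict String (List (String × String))) : Prop :=
  d2.items = d1.items.map pvWMap ∧ (∀ p ∈ d1.items, p.2 ≠ []) ∧ d1.keys.Nodup

theorem pvKeys_eq {d1 : PySem.Dict String (List (List (String × String)))}
    {d2 : PySem.Dict String (List (String × String))} (h : d2.items = d1.items.map pvWMap) :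
    d2.keys = d1.keys := by
  simp [PySem.Dict.keys, h, List.map_map, pvWMap, Function.comp]

theorem pvRel_step (plen : Int) (r : List (String × String))
    (d1 : PySem.Dict String (List (List (String × String))))
    (d2 : PySem.Dict String (List (String × String))) (h : pvRel d1 d2) :
    pvRel (d1.modify (pvPrefix r plen) [] (fun g => g ++ [r]))
      (let key := pvPrefix r plen
       match d2.get? key with
       | none => d2.insert key r
       | some cur => if pvGet cur "start_time" ≤ pvGet r "start_time" then d2.insert key r else d2) := by
  obtain ⟨h1, h2, h3⟩ := h
  set k := pvPrefix r plen with hk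
  have hkeys : d2.keys = d1.keys := pvKeys_eq h1
  have h3' : d2.keys.Nodup := hkeys ▸ h3
  have hcont : d2.contains k = d1.contains k := by
    simp [PySem.Dict.contains_eq_decide_mem_keys, hkeys]
  by_cases hc : d1.contains k = true
  · -- key already present
    rcases hg? : d1.get? k with _ | g
    · rw [PySem.Dict.get?_eq_none_iff_contains] at hg?; rw [hc] at hg?; cases hg?
    have hmem : (k, g) ∈ d1.items := PySem.Dict.mem_items_of_get?_eq_some _ hg?
    have hgne : g ≠ [] := h2 _ hmem
    have hgetD : d1.getD k [] = g := by rw [PySem.Dict.getD_eq_get?_getD, hg?]; rfl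
    have hmem2 : (k, pvWinner g) ∈ d2.items := by
      rw [h1]; exact List.mem_map.mpr ⟨(k, g), hmem, rfl⟩
    have hget2 : d2.get? k = some (pvWinner g) := PySem.Dict.get?_of_mem_items _ hmem2 h3'
    have hc2 : d2.contains k = true := hcont ▸ hc
    have hptk : ∀ p ∈ d1.items, p.1 = k → p = (k, g) := by
      intro p hp hpk
      have := PySem.Dict.getD_of_mem_items (d := d1) (k := p.1) (v := p.2)
        (by exact (Prod.mk.eta (p := p)) ▸ hp) h3 []
      rw [hpk, hgetD] at this
      exact Prod.ext hpk this.symm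
    have hitemsA : (d1.modify k [] (fun g => g ++ [r])).items =
        d1.items.map (fun p => if (p.1 == k) = true then (k, g ++ [r]) else p) := by
      simp only [PySem.Dict.modify, hgetD]
      exact PySem.Dict.items_insert_of_contains _ _ hc
    simp only [hget2]
    constructor
    · -- items relation
      by_cases hle : pvGet (pvWinner g) "start_time" ≤ pvGet r "start_time"
      · rw [if_pos hle]
        rw [PySem.Dict.items_insert_of_contains _ _ hc2, hitemsA, h1, List.map_map, List.map_map]
        apply List.map_congr_left
        intro p hp
        by_cases hpk : p.1 = k
        · have hpg := hptk p hp hpk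
          subst hpg
          simp only [Function.comp_apply, pvWMap, beq_self_eq_true, if_true]
          rw [pvWinner_append g r hgne]
          simp [pvWStep, pvSt, hle]
        · simp [Function.comp_apply, pvWMap, hpk]
      · rw [if_neg hle, h1, hitemsA, List.map_map]
        apply List.map_congr_left
        intro p hp
        by_cases hpk : p.1 = k
        · have hpg := hptk p hp hpk
          subst hpg
          simp only [Function.comp_apply, pvWMap, beq_self_eq_true, if_true]
          rw [pvWinner_append g r hgne]
          simp [pvWStep, pvSt, hle]
        · simp [Function.comp_apply, pvWMap, hpk]
    constructor
    · intro p hp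
      rw [hitemsA] at hp
      rcases List.mem_map.mp hp with ⟨q, hq, rfl⟩
      split
      · simp
      · exact h2 _ hq
    · simp only [PySem.Dict.modify, hgetD]
      rw [PySem.Dict.keys_insert_of_contains _ _ hc]
      exact h3
  · -- fresh key
    have hcf : d1.contains k = false := by simpa using hc
    have hc2 : d2.contains k = false := by rw [hcont]; exact hcf
    have hgetD : d1.getD k [] = [] := PySem.Dict.getD_of_not_contains _ _ hcf
    have hget2 : d2.get? k = none := (PySem.Dict.get?_eq_none_iff_contains _ _).mpr hc2
    have hitemsA : (d1.modify k [] (fun g => g ++ [r])).items = d1.items ++ [(k, [r])] := by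
      simp only [PySem.Dict.modify, hgetD]
      exact PySem.Dict.items_insert_of_not_contains _ _ hcf
    refine ⟨?_, ?_, ?_⟩
    · simp only [hget2]
      rw [PySem.Dict.items_insert_of_not_contains _ _ hc2, hitemsA, h1]
      simp [pvWMap, pvWinner]
    · intro p hp
      rw [hitemsA] at hp
      rcases List.mem_append.mp hp with hp | hp
      · exact h2 _ hp
      · simp at hp; subst hp; simp
    · simp only [PySem.Dict.modify, hgetD]
      rw [PySem.Dict.keys_insert_of_not_contains _ _ hcf]
      refine List.nodup_append.mpr ⟨h3, List.nodup_singleton _, ?_⟩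
      simp only [PySem.Dict.contains_eq_decide_mem_keys, decide_eq_false_iff_not] at hcf
      intro a ha b hb he
      rw [List.mem_singleton.mp hb] at he
      exact hcf (he ▸ ha)

theorem pvRel_fold (plen : Int) (rows : List (List (String × String)))
    (d1 : PySem.Dict String (List (List (String × String))))
    (d2 : PySem.Dict String (List (String × String))) (h : pvRel d1 d2) :
    pvRel (rows.foldl (fun d row => d.modify (pvPrefix row plen) [] (fun g => g ++ [row])) d1)
      (rows.foldl (fun d row =>
        let key := pvPrefix row plen
        match d.get? key with
        | none => d.insert key row
        | some cur => if pvGet cur "start_time" ≤ pvGet row "start_time" then d.insert key row else d) d2) := by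
  induction rows generalizing d1 d2 with
  | nil => exact h
  | cons r rows ih =>
    simp only [List.foldl_cons]
    exact ih _ _ (pvRel_step plen r d1 d2 h)

theorem pvMain (rows : List (List (String × String))) (plen : Int) :
    deduplicate_by_prefix rows plen = deduplicate_by_prefix_alt rows plen := by
  simp only [deduplicate_by_prefix, deduplicate_by_prefix_alt]
  obtain ⟨h1, h2, h3⟩ := pvRel_fold plen rows PySem.Dict.empty PySem.Dict.empty
    ⟨rfl, by refine ⟨?_, PySem.Dict.nodup_keys_empty⟩; intro p hp; simp [PySem.Dict.empty] at hp⟩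
  congr 1
  rw [show (fun (acc : List (List (String × String))) pg =>
        if pg.2.length == 1 then acc ++ [PySem.List.pyGetD pg.2 0 []]
        else acc ++ [PySem.List.pyGetD (PySem.List.sorted pg.2 (fun x => pvGet x "start_time") false) (-1) []])
      = (fun acc (pg : String × List (List (String × String))) => acc ++
          [if pg.2.length == 1 then PySem.List.pyGetD pg.2 0 []
           else PySem.List.pyGetD (PySem.List.sorted pg.2 (fun x => pvGet x "start_time") false) (-1) []])
      from by funext acc pg; split <;> rfl]
  rw [PySem.List.foldl_append_singleton_eq_map, List.nil_append]
  simp only [PySem.Dict.values, h1, List.map_map]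
  apply List.map_congr_left
  intro p hp
  have hpne : p.2 ≠ [] := h2 p hp
  simp only [Function.comp_apply, pvWMap]
  by_cases hlen : p.2.length == 1
  · rcases List.length_eq_one_iff.mp (by simpa using hlen) with ⟨a, ha⟩
    rw [if_pos hlen, ha]
    simp [PySem.List.pyGetD_zero_cons, pvWinner]
  · rw [if_neg hlen]
    have hsne : PySem.List.sorted p.2 (fun x => pvGet x "start_time") false ≠ [] := by
      rw [Ne, PySem.List.sorted_eq_nil_iff]; exact hpne
    rw [PySem.List.pyGetD_neg_one _ _ hsne]
    have h : (PySem.List.sorted p.2 (fun x => pvGet x "start_time") false).getLast? = some (pvWinner p.2) :=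
      pvWinner_last p.2 hpne
    rw [List.getLast?_eq_some_getLast hsne] at h
    exact Option.some_injective _ h

-- ===== VERDICT (by name: the statement is the Claim_ definition above) =====
theorem deduplicate_by_prefix_spec : Claim_equal_deduplicate_by_prefix := by
  intro rows prefix_length _ _
  exact pvMain rows prefix_length
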